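-- pv_equiv track=rewrite | github.com/sneha-royal/Mapup_Assesment | submissions/python_section_1.py | reverse_by_n_elements
-- ===== SOURCE A (Python) =====
-- def reverse_by_n_elements(lst, n):
--
--     for i in range(0, len(lst), n):
--         left = i
--         right = min(i + n - 1, len(lst) - 1)
--
--         # Reverse elements in the current group of n elements
--         while left < right:
--             # Swap the elements
--             lst[left], lst[right] = lst[right], lst[left]
--             left += 1
--             right -= 1
--
--     return lst
-- ===== SOURCE B (Python) =====
-- def reverse_by_n_elements(lst, n):
--     for i in range(0, len(lst), n):
--         lst[i:i+n] = lst[i:i+n][::-1]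
--     return lst
-- ===== Notes on version B (the rewrite author's own statement) =====
-- stated objective: simpler
-- what changed: Replaces the two-pointer in-place swap loop inside each group by a single slice-splice (lst[i:i+n] = lst[i:i+n][::-1]); no left/right indices, no min() bound and no element swaps are maintained.
import Mathlib
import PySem

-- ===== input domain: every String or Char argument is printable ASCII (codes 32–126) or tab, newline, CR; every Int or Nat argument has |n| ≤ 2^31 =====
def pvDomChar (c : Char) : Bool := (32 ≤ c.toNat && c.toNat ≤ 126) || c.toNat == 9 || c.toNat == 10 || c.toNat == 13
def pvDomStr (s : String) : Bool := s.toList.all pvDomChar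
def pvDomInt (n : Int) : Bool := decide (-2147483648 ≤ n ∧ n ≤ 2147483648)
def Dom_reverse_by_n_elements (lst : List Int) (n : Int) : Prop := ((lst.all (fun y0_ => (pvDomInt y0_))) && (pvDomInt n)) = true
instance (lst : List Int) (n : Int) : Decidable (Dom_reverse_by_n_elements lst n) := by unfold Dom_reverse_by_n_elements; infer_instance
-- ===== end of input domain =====

-- B replaces A's two-pointer in-place swap loop inside each group with a single
-- slice-splice (lst[i:i+n] = lst[i:i+n][::-1]); simpler, same cost. A mutates its
-- argument in place and B performs the same mutation; the equivalence proved here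
-- is about the returned value.


-- ===== PORT A =====
-- lst[left], lst[right] = lst[right], lst[left]; whenever A's inner loop body runs,
-- 0 ≤ left < right ≤ len-1 holds, so .toNat and getD are exact here.
def pySwapA (lst : List Int) (i j : Int) : List Int :=
  (lst.set i.toNat (lst.getD j.toNat 0)).set j.toNat (lst.getD i.toNat 0)

-- A's inner 'while left < right' loop
def swapLoopA (lst : List Int) (left right : Int) : List Int :=
  if left < right then swapLoopA (pySwapA lst left right) (left + 1) (right - 1) else lst
termination_by (right - left).toNat
decreasing_by omega

def reverse_by_n_elements (lst : List Int) (n : Int) : List Int :=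
  (PySem.List.pyRange 0 lst.length n).foldl (fun acc i =>
    swapLoopA acc i (min (i + n - 1) ((acc.length : Int) - 1))) lst

-- ===== PORT B =====
-- lst[i:i+n] = lst[i:i+n][::-1]  (slice assignment: prefix ++ reversed slice ++ suffix;
-- [::-1] is reversal, PySem.List.slice?_none_none_neg_one)
def reverse_by_n_elements_alt (lst : List Int) (n : Int) : List Int :=
  (PySem.List.pyRange 0 lst.length n).foldl (fun acc i =>
    PySem.List.slice acc none (some i)
      ++ (PySem.List.slice acc (some i) (some (i + n))).reverse
      ++ PySem.List.slice acc (some (i + n)) none) lst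

-- ===== PRECONDITION & SPEC =====
-- Pre_: n ≠ 0, since range(0, len(lst), 0) raises ValueError in Python (in A and in B alike).
def Pre_reverse_by_n_elements (lst : List Int) (n : Int) : Prop := n ≠ 0
instance (lst : List Int) (n : Int) : Decidable (Pre_reverse_by_n_elements lst n) := by unfold Pre_reverse_by_n_elements; infer_instance
def pvWitness_reverse_by_n_elements : List Int × Int := ([1, 2, 3, 4, 5], 2)
def Spec_reverse_by_n_elements (lst : List Int) (n : Int) (out : List Int) : Prop := out = reverse_by_n_elements_alt lst n
instance (lst : List Int) (n : Int) (out : List Int) : Decidable (Spec_reverse_by_n_elements lst n out) := by unfold Spec_reverse_by_n_elements; infer_instance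

-- ===== CLAIM (what is proved, stated in full; the proofs are below) =====
def Claim_equal_reverse_by_n_elements : Prop := ∀ (lst : List Int) (n : Int), Dom_reverse_by_n_elements lst n → Pre_reverse_by_n_elements lst n → Spec_reverse_by_n_elements lst n (reverse_by_n_elements lst n)

-- ===== LEMMAS AND PROOFS =====

-- Python's simultaneous swap of the two ends of the middle segment
lemma pySwapA_ends (pre mid post : List Int) (x z : Int) :
    pySwapA (pre ++ (x :: mid ++ [z]) ++ post) (pre.length : Int) ((pre.length : Int) + mid.length + 1)
      = pre ++ (z :: mid ++ [x]) ++ post := by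
  unfold pySwapA
  have h1 : ((pre.length : Int)).toNat = pre.length := by omega
  have h2 : ((pre.length : Int) + mid.length + 1).toNat = pre.length + (mid.length + 1) := by omega
  rw [h1, h2]
  simp [List.getD]

-- A's inner swap loop, run over the middle segment of pre ++ seg ++ post, reverses seg.
lemma swapLoopA_decomp : ∀ (m : Nat) (seg pre post : List Int), seg.length = m →
    swapLoopA (pre ++ seg ++ post) (pre.length : Int) ((pre.length : Int) + seg.length - 1)
      = pre ++ seg.reverse ++ post := by
  intro m
  induction m using Nat.strong_induction_on with
  | _ m ih =>
    intro seg pre post hm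
    match seg, hm with
    | [], _ =>
      rw [swapLoopA, if_neg (by simp)]
      simp
    | [x], _ =>
      rw [swapLoopA, if_neg (by simp)]
      simp
    | x :: y :: rest, hm =>
      obtain ⟨mid, z, hmz⟩ : ∃ mid z, y :: rest = mid ++ [z] :=
        ⟨(y :: rest).dropLast, (y :: rest).getLast (by simp), by
          rw [List.dropLast_append_getLast]⟩
      have hml : mid.length = rest.length := by
        have := congrArg List.length hmz; simp at this; omega
      rw [show x :: y :: rest = x :: mid ++ [z] from by rw [hmz]; simp]
      have hlen : (x :: mid ++ [z]).length = mid.length + 2 := by simp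
      rw [swapLoopA, if_pos (by simp; omega)]
      have harg : (pre.length : Int) + (x :: mid ++ [z]).length - 1 = (pre.length : Int) + mid.length + 1 := by
        simp; omega
      rw [harg, pySwapA_ends]
      have hregroup : pre ++ (z :: mid ++ [x]) ++ post = (pre ++ [z]) ++ mid ++ (x :: post) := by
        simp
      rw [hregroup]
      have h2 : (pre.length : Int) + mid.length + 1 - 1 = ((pre ++ [z]).length : Int) + mid.length - 1 := by
        simp; omega
      rw [h2, show (pre.length : Int) + 1 = ((pre ++ [z]).length : Int) from by simp]
      rw [ih mid.length (by simp at hm; omega) mid (pre ++ [z]) (x :: post) rfl]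
      simp

-- each step of A (the two-pointer loop on group i) equals the corresponding step of B (the splice)
lemma step_eq (acc : List Int) (i n : Int) (h0 : 0 ≤ i) (hi : i < (acc.length : Int)) (hn : 0 < n) :
    swapLoopA acc i (min (i + n - 1) ((acc.length : Int) - 1))
      = PySem.List.slice acc none (some i)
          ++ (PySem.List.slice acc (some i) (some (i + n))).reverse
          ++ PySem.List.slice acc (some (i + n)) none := by
  set l := i.toNat with hl
  set k := n.toNat with hk
  set pre := acc.take l with hpre
  set seg := (acc.drop l).take k with hseg
  set post := acc.drop (l + k) with hpost
  have hacc : acc = pre ++ seg ++ post := by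
    rw [hpre, hseg, hpost, List.append_assoc, ← List.drop_drop, List.take_append_drop,
        List.take_append_drop]
  have hprel : pre.length = l := by
    rw [hpre]; simp; omega
  have hsegl : seg.length = min k (acc.length - l) := by
    rw [hseg]; simp [List.length_drop]
  have h1 : i = (pre.length : Int) := by rw [hprel]; omega
  have h2 : min (i + n - 1) ((acc.length : Int) - 1) = (pre.length : Int) + seg.length - 1 := by
    rw [hprel, hsegl]; omega
  have hB1 : PySem.List.slice acc none (some i) = pre := by
    rw [PySem.List.slice_to acc h0]
  have hB2 : PySem.List.slice acc (some i) (some (i + n)) = seg := by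
    rw [PySem.List.slice_toNat acc h0 (by omega)]
    rw [hseg]
    congr 1
    omega
  have hB3 : PySem.List.slice acc (some (i + n)) none = post := by
    rw [PySem.List.slice_from acc (by omega)]
    rw [hpost]
    congr 1
    omega
  rw [hB1, hB2, hB3, h2, h1]
  conv_lhs => rw [hacc]
  exact swapLoopA_decomp seg.length seg pre post rfl

-- B's step keeps the list length (the splice replaces a slice by one of the same length)
lemma Bstep_length (acc : List Int) (i n : Int) (h0 : 0 ≤ i) (hn : 0 < n) :
    (PySem.List.slice acc none (some i)
      ++ (PySem.List.slice acc (some i) (some (i + n))).reverse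
      ++ PySem.List.slice acc (some (i + n)) none).length = acc.length := by
  rw [PySem.List.slice_to acc h0, PySem.List.slice_toNat acc h0 (by omega),
      PySem.List.slice_from acc (by omega)]
  simp [List.length_drop]
  omega

-- both folds over the group starts agree, step by step, keeping 'length = L' invariant
lemma fold_eq (n : Int) (hn : 0 < n) (L : Nat) :
    ∀ (is : List Int) (acc : List Int), acc.length = L → (∀ i ∈ is, 0 ≤ i ∧ i < (L : Int)) →
      is.foldl (fun acc i => swapLoopA acc i (min (i + n - 1) ((acc.length : Int) - 1))) acc
        = is.foldl (fun acc i =>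
            PySem.List.slice acc none (some i)
              ++ (PySem.List.slice acc (some i) (some (i + n))).reverse
              ++ PySem.List.slice acc (some (i + n)) none) acc := by
  intro is
  induction is with
  | nil => intro acc _ _; rfl
  | cons j t ih =>
    intro acc hL hmem
    obtain ⟨hj0, hjL⟩ := hmem j (by simp)
    simp only [List.foldl_cons]
    rw [step_eq acc j n hj0 (by omega) hn]
    exact ih _ (by rw [Bstep_length acc j n hj0 hn, hL]) (fun i hi => hmem i (by simp [hi]))

lemma pyRange_neg_eq_nil (L : Nat) (n : Int) (h : n < 0) : PySem.List.pyRange 0 L n = [] := by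
  simp only [PySem.List.pyRange]
  rw [if_neg (by omega), if_neg (by omega), if_neg (by omega)]
  simp

-- ===== VERDICT (by name: the statement is the Claim_ definition above) =====
theorem reverse_by_n_elements_spec : Claim_equal_reverse_by_n_elements := by
  intro lst n _ hn
  unfold Spec_reverse_by_n_elements reverse_by_n_elements reverse_by_n_elements_alt
  rcases lt_trichotomy n 0 with h | h | h
  · rw [pyRange_neg_eq_nil lst.length n h]; rfl
  · exact absurd h hn
  · exact fold_eq n h lst.length _ lst rfl (fun i hi => by
      have := (PySem.List.mem_pyRange_iff_of_pos h i).1 hi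
      exact ⟨this.1, this.2.1⟩)
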